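-- pv_equiv track=rewrite | github.com/AndewNN/Quantum_Computing | Utils/qaoaCUDAQ.py | pauli_to_int
-- ===== SOURCE A (Python) =====
-- def pauli_to_int(pauli_str: str) -> int:
--     value = 0
--     for i, char in enumerate(pauli_str):
--         if char == 'I':
--             value |= (1 << (2 * i)) * 0
--         elif char == 'X':
--             value |= (1 << (2 * i)) * 1
--         elif char == 'Y':
--             value |= (1 << (2 * i)) * 2
--         elif char == 'Z':
--             value |= (1 << (2 * i)) * 3
--     return value
-- ===== SOURCE B (Python) =====
-- def pauli_to_int(pauli_str: str) -> int:
--     n = len(pauli_str)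
--     if n == 0:
--         return 0
--     if n == 1:
--         return 1 if pauli_str == 'X' else 2 if pauli_str == 'Y' else 3 if pauli_str == 'Z' else 0
--     mid = n // 2
--     return pauli_to_int(pauli_str[:mid]) + pauli_to_int(pauli_str[mid:]) * 4 ** mid
-- ===== Notes on version B (the rewrite author's own statement) =====
-- stated objective: alternative
-- what changed: Replaces the single indexed shift-and-OR loop with a divide-and-conquer recursion: split the string in half, encode each half recursively, and combine as left + right * 4**mid; single characters are coded directly, everything but X/Y/Z codes 0.
import Mathlib
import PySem

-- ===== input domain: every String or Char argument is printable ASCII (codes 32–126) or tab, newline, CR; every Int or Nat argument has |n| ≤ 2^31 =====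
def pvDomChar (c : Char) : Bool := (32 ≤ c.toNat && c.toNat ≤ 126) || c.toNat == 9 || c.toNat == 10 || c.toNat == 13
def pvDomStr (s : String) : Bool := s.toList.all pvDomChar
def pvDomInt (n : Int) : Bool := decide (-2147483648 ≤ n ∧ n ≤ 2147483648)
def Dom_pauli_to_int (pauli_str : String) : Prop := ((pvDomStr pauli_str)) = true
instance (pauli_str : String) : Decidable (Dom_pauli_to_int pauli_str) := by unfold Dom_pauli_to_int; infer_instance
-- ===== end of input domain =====

-- B replaces A's single indexed shift-and-OR loop with a divide-and-conquer recursion: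
-- split the string in half, encode each half recursively, combine as left + right * 4^mid.


-- ===== PORT A =====
-- for i, char in enumerate(pauli_str): value |= (1 << (2*i)) * k   (k per branch)
def pauli_to_int (pauli_str : String) : Int :=
  (PySem.List.enumerate pauli_str.toList).foldl
    (fun value p =>
      if p.2 == 'I' then PySem.Int.bor value ((1 <<< (2 * p.1).toNat) * 0)
      else if p.2 == 'X' then PySem.Int.bor value ((1 <<< (2 * p.1).toNat) * 1)
      else if p.2 == 'Y' then PySem.Int.bor value ((1 <<< (2 * p.1).toNat) * 2)
      else if p.2 == 'Z' then PySem.Int.bor value ((1 <<< (2 * p.1).toNat) * 3)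
      else value) 0

-- ===== PORT B =====
-- divide and conquer on the character list (the string's code points):
-- n == 0 → 0; n == 1 → direct code of the single character;
-- otherwise mid = n // 2 and pauli_to_int(s[:mid]) + pauli_to_int(s[mid:]) * 4 ** mid
def pauli_to_int_alt_go : Nat → List Char → Int
  | 0, _ => 0          -- fuel exhausted: never reached (fuel starts at the length and halving shrinks it)
  | fuel + 1, l =>
    if l.length = 0 then 0
    else if l.length = 1 then
      if l = ['X'] then 1 else if l = ['Y'] then 2 else if l = ['Z'] then 3 else 0
    else
      pauli_to_int_alt_go fuel (PySem.List.slice l none (some ((l.length / 2 : Nat) : Int)))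
      + pauli_to_int_alt_go fuel (PySem.List.slice l (some ((l.length / 2 : Nat) : Int)) none)
        * 4 ^ (l.length / 2)

def pauli_to_int_alt (pauli_str : String) : Int := pauli_to_int_alt_go pauli_str.toList.length pauli_str.toList

-- ===== PRECONDITION & SPEC =====
def Spec_pauli_to_int (pauli_str : String) (out : Int) : Prop := out = pauli_to_int_alt pauli_str
instance (pauli_str : String) (out : Int) : Decidable (Spec_pauli_to_int pauli_str out) := by unfold Spec_pauli_to_int; infer_instance

-- ===== CLAIM (what is proved, stated in full; the proofs are below) =====
def Claim_equal_pauli_to_int : Prop := ∀ (pauli_str : String), Dom_pauli_to_int pauli_str → Spec_pauli_to_int pauli_str (pauli_to_int pauli_str)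

-- ===== LEMMAS AND PROOFS =====

-- the common value: code of one character, 0 for 'I' and anything unrecognised
def pvCodeN (c : Char) : Nat :=
  if c = 'X' then 1 else if c = 'Y' then 2 else if c = 'Z' then 3 else 0

-- little-endian base-4 value of the whole string
def pvHorner : List Char → Nat
  | [] => 0
  | c :: t => pvCodeN c + 4 * pvHorner t

theorem pvCodeN_lt (c : Char) : pvCodeN c < 4 := by
  unfold pvCodeN; split_ifs <;> norm_num

-- disjoint OR is addition
theorem lor_shift_eq_add (a b n : Nat) (h : a < 2^n) : a ||| (b <<< n) = a + b <<< n := by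
  rw [Nat.shiftLeft_eq]
  apply Nat.eq_of_testBit_eq
  intro j
  have h1 : (2^n * b + a).testBit j = if j < n then a.testBit j else b.testBit (j - n) :=
    Nat.testBit_two_pow_mul_add b h j
  have h2 : (2^n * b + 0).testBit j = if j < n then Nat.testBit 0 j else b.testBit (j - n) :=
    Nat.testBit_two_pow_mul_add b (by positivity) j
  rw [Nat.testBit_lor, show a + b * 2^n = 2^n * b + a by ring, h1]
  by_cases hj : j < n
  · have h3 : (b * 2^n).testBit j = false := by
      simpa [hj, Nat.mul_comm] using h2
    simp [hj, h3]
  · have h3 : a.testBit j = false :=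
      Nat.testBit_lt_two_pow (lt_of_lt_of_le h (Nat.pow_le_pow_right (by norm_num) (by omega)))
    have h4 : (b * 2^n).testBit j = b.testBit (j - n) := by
      simpa [hj, Nat.mul_comm] using h2
    simp [hj, h3, h4]

-- one step of A's loop body, on a natural accumulator below 4^i
theorem pvStepA (vn i : Nat) (c : Char) (h : vn < 4^i) :
    (if (c == 'I') = true then PySem.Int.bor (vn : Int) (((1 <<< (2 * (i:Int)).toNat : Nat) : Int) * 0)
      else if (c == 'X') = true then PySem.Int.bor (vn : Int) (((1 <<< (2 * (i:Int)).toNat : Nat) : Int) * 1)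
      else if (c == 'Y') = true then PySem.Int.bor (vn : Int) (((1 <<< (2 * (i:Int)).toNat : Nat) : Int) * 2)
      else if (c == 'Z') = true then PySem.Int.bor (vn : Int) (((1 <<< (2 * (i:Int)).toNat : Nat) : Int) * 3)
      else (vn : Int))
    = ((vn + pvCodeN c * 4^i : Nat) : Int) := by
  have htn : ((2 * (i : Int)).toNat) = 2 * i := by omega
  have hlt : vn < 2 ^ (2 * i) := by
    have h4 : (4:Nat)^i = 2^(2*i) := by rw [pow_mul]; norm_num
    omega
  have key : ∀ k : Nat, PySem.Int.bor (vn : Int) (((1 <<< (2 * (i:Int)).toNat : Nat) : Int) * (k : Int))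
      = ((vn + k * 4^i : Nat) : Int) := by
    intro k
    have hk : ((1 <<< (2 * (i:Int)).toNat : Nat) : Int) * (k : Int) = ((k <<< (2*i) : Nat) : Int) := by
      rw [htn, Nat.shiftLeft_eq, Nat.shiftLeft_eq]
      push_cast; ring
    rw [hk, PySem.Int.bor_natCast, lor_shift_eq_add vn k (2*i) hlt]
    have hs : k <<< (2*i) = k * 4^i := by
      rw [Nat.shiftLeft_eq, pow_mul]; norm_num
    rw [hs]
  by_cases hI : c = 'I'
  · rw [if_pos (by simp [hI])]
    have h0 := key 0
    simp only [Nat.cast_zero] at h0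
    rw [h0]; simp [pvCodeN, hI]
  · by_cases hX : c = 'X'
    · rw [if_neg (by simp [hI]), if_pos (by simp [hX])]; simpa [pvCodeN, hX] using key 1
    · by_cases hY : c = 'Y'
      · rw [if_neg (by simp [hI]), if_neg (by simp [hX]), if_pos (by simp [hY])]
        simpa [pvCodeN, hX, hY] using key 2
      · by_cases hZ : c = 'Z'
        · rw [if_neg (by simp [hI]), if_neg (by simp [hX]), if_neg (by simp [hY]),
            if_pos (by simp [hZ])]
          simpa [pvCodeN, hX, hY, hZ] using key 3
        · rw [if_neg (by simp [hI]), if_neg (by simp [hX]), if_neg (by simp [hY]),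
            if_neg (by simp [hZ])]
          simp [pvCodeN, hX, hY, hZ]

-- A's loop from index i with accumulator vn < 4^i
theorem pvLoopA (l : List Char) : ∀ (i vn : Nat),  vn < 4^i →
    (PySem.List.enumerate l (i : Int)).foldl
      (fun value p =>
        if p.2 == 'I' then PySem.Int.bor value (((1 <<< (2 * p.1).toNat : Nat) : Int) * 0)
        else if p.2 == 'X' then PySem.Int.bor value (((1 <<< (2 * p.1).toNat : Nat) : Int) * 1)
        else if p.2 == 'Y' then PySem.Int.bor value (((1 <<< (2 * p.1).toNat : Nat) : Int) * 2)
        else if p.2 == 'Z' then PySem.Int.bor value (((1 <<< (2 * p.1).toNat : Nat) : Int) * 3)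
        else value) (vn : Int)
    = ((vn + 4^i * pvHorner l : Nat) : Int) := by
  induction l with
  | nil => intro i vn h; simp [PySem.List.enumerate_nil, pvHorner]
  | cons c t ih =>
    intro i vn h
    rw [PySem.List.enumerate_cons, List.foldl_cons]
    dsimp only
    rw [pvStepA vn i c h]
    have hnext : vn + pvCodeN c * 4^i < 4^(i+1) := by
      have hlt := pvCodeN_lt c
      have h4 : (4:Nat)^(i+1) = 4 * 4^i := by ring
      nlinarith
    rw [show ((i : Int) + 1) = (((i + 1 : Nat)) : Int) by push_cast; ring,
      ih (i+1) (vn + pvCodeN c * 4^i) hnext]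
    congr 1
    have h4 : (4:Nat)^(i+1) = 4 * 4^i := by ring
    simp [pvHorner, h4]; ring

-- Horner's value splits over append
theorem pvHorner_append (a b : List Char) :
    pvHorner (a ++ b) = pvHorner a + 4 ^ a.length * pvHorner b := by
  induction a with
  | nil => simp [pvHorner]
  | cons c t ih => simp [pvHorner, ih]; ring

-- B's recursion computes Horner's value (induction on the fuel)
theorem pvGoAux : ∀ (fuel : Nat) (l : List Char), l.length ≤ fuel →
    pauli_to_int_alt_go fuel l = (pvHorner l : Int) := by
  intro fuel
  induction fuel with
  | zero =>
    intro l hl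
    have hnil : l = [] := List.length_eq_zero_iff.mp (by omega)
    subst hnil
    simp [pauli_to_int_alt_go, pvHorner]
  | succ n ih =>
    intro l hl
    rw [pauli_to_int_alt_go]
    by_cases h0 : l.length = 0
    · rw [if_pos h0, List.length_eq_zero_iff.mp h0]; simp [pvHorner]
    · rw [if_neg h0]
      by_cases h1 : l.length = 1
      · rw [if_pos h1]
        obtain ⟨c, hc⟩ := List.length_eq_one_iff.mp h1
        subst hc
        by_cases hX : c = 'X'
        · simp [hX, pvHorner, pvCodeN]
        · by_cases hY : c = 'Y'
          · simp [hY, pvHorner, pvCodeN]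
          · by_cases hZ : c = 'Z'
            · simp [hZ, pvHorner, pvCodeN]
            · simp [hX, hY, hZ, pvHorner, pvCodeN]
      · rw [if_neg h1, PySem.List.slice_to_natCast, PySem.List.slice_from_natCast]
        rw [ih (l.take (l.length / 2)) (by simp; omega),
          ih (l.drop (l.length / 2)) (by simp; omega)]
        have hsplit := pvHorner_append (l.take (l.length / 2)) (l.drop (l.length / 2))
        rw [List.take_append_drop] at hsplit
        have hlen : (l.take (l.length / 2)).length = l.length / 2 := by simp; omega
        rw [hsplit, hlen]
        push_cast
        ring

-- ===== VERDICT (by name: the statement is the Claim_ definition above) =====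
theorem pauli_to_int_spec : Claim_equal_pauli_to_int := by
  intro s _
  unfold Spec_pauli_to_int pauli_to_int pauli_to_int_alt
  have hA := pvLoopA s.toList 0 0 (by norm_num)
  simp only [Nat.cast_zero, pow_zero, one_mul, Nat.zero_add] at hA
  exact hA.trans (pvGoAux s.toList.length s.toList le_rfl).symm
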